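-- pv_equiv track=rewrite | github.com/imathur1/google-foobar | Level_3/Lvl_3_Part_2.py | answer
-- ===== SOURCE A (Python) =====
-- def answer(start, length):
--     output = 0
--     alt = length
--
--     while length > 0:
--         for i in range(1, length + 1):
--             output ^= start
--             start += 1
--
--         start += alt - length
--         length -= 1
--
--     return output
-- ===== SOURCE B (Python) =====
-- def answer(start, length):
--     # O(length): each row's XOR in O(1) via the prefix-XOR formula, extended to negatives
--     def F(n):
--         # F(n) ^ F(a) = XOR of all integers in [a, n) for a <= n
--         if n >= 0:
--             m = n
--             s = 0
--         else:
--             m = -n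
--             s = -(m & 1)
--         if m > 0:
--             mm = m - 1
--             r = mm % 4
--             if r == 0:
--                 g = mm
--             elif r == 1:
--                 g = 1
--             elif r == 2:
--                 g = mm + 1
--             else:
--                 g = 0
--         else:
--             g = 0
--         return g ^ s
--
--     out = 0
--     for r in range(length):
--         a = start + r * length
--         out ^= F(a + length - r) ^ F(a)
--     return out
-- ===== Notes on version B (the rewrite author's own statement) =====
-- stated objective: faster
-- what changed: Replaces A's element-by-element double loop (XOR each of start..start+row_len-1 for every row) with a single pass over the rows that computes each row's XOR in O(1) via the period-4 prefix-XOR closed form, extended to negative ranges through two's-complement parity.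
import Mathlib
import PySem

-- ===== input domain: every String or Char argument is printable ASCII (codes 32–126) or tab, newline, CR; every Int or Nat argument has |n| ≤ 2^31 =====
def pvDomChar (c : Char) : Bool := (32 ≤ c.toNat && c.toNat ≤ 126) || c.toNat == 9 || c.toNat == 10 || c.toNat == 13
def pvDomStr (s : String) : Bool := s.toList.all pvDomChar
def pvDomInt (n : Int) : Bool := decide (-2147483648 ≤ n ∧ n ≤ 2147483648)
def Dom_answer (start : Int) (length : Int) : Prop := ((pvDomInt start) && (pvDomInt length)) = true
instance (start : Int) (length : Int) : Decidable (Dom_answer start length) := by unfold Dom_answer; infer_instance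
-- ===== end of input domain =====

-- B replaces A's O(length^2) element-by-element XOR with an O(length) per-row prefix-XOR formula.

-- ===== PORT A =====
-- inner 'for i in range(1, length + 1)' loop over state (output, start)
def innerA : List Int → Int × Int → Int × Int
  | [], st => st
  | _ :: rest, (output, start) => innerA rest (PySem.Int.bxor output start, start + 1)

-- the 'while length > 0' loop
def loopA (output start length alt : Int) : Int :=
  if h : 0 < length then
    let st := innerA (PySem.List.pyRange 1 (length + 1) 1) (output, start)
    loopA st.1 (st.2 + (alt - length)) (length - 1) alt
  else output
termination_by length.toNat
decreasing_by omega

def answer (start : Int) (length : Int) : Int := loopA 0 start length length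

-- ===== PORT B =====
-- g-part of F: XOR of 0..m-1 via the period-4 closed form (the if/elif chain in Source B)
def pyG (m : Int) : Int :=
  if 0 < m then
    let mm := m - 1
    let r := PySem.Int.mod mm 4
    if r = 0 then mm else if r = 1 then 1 else if r = 2 then mm + 1 else 0
  else 0

-- F(n): F(n) ^ F(a) = XOR of all integers in [a, n)
def pyF (n : Int) : Int :=
  let p := if 0 ≤ n then (n, 0) else (-n, -(PySem.Int.band (-n) 1))
  PySem.Int.bxor (pyG p.1) p.2

def answer_alt (start : Int) (length : Int) : Int :=
  (PySem.List.pyRange 0 length 1).foldl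
    (fun out r =>
      let a := start + r * length
      PySem.Int.bxor out (PySem.Int.bxor (pyF (a + length - r)) (pyF a))) 0

-- ===== PRECONDITION & SPEC =====
def Spec_answer (start : Int) (length : Int) (out : Int) : Prop := out = answer_alt start length
instance (start : Int) (length : Int) (out : Int) : Decidable (Spec_answer start length out) := by unfold Spec_answer; infer_instance

-- ===== CLAIM (what is proved, stated in full; the proofs are below) =====
def Claim_equal_answer : Prop := ∀ (start : Int) (length : Int), Dom_answer start length → Spec_answer start length (answer start length)

-- ===== LEMMAS AND PROOFS =====

-- XOR algebra for PySem.Int.bxor, via the sign/magnitude encoding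
def benc (s : Bool) (n : Nat) : Int := if s then -(n : Int) - 1 else n

theorem bxor_benc (s1 s2 : Bool) (n1 n2 : Nat) :
    PySem.Int.bxor (benc s1 n1) (benc s2 n2) = benc (xor s1 s2) (n1 ^^^ n2) := by
  cases s1 <;> cases s2 <;>
    simp [benc, PySem.Int.bxor] <;> omega

theorem benc_surj (a : Int) : a = benc (decide (a < 0)) (if 0 ≤ a then a.toNat else (-a - 1).toNat) := by
  by_cases h : 0 ≤ a <;> simp [benc, h] <;> omega

theorem bxor_assoc (a b c : Int) :
    PySem.Int.bxor (PySem.Int.bxor a b) c = PySem.Int.bxor a (PySem.Int.bxor b c) := by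
  rw [benc_surj a, benc_surj b, benc_surj c]
  rw [bxor_benc, bxor_benc, bxor_benc, bxor_benc]
  rw [Bool.xor_assoc, Nat.xor_assoc]

theorem bxor_left_comm (a b c : Int) :
    PySem.Int.bxor a (PySem.Int.bxor b c) = PySem.Int.bxor b (PySem.Int.bxor a c) := by
  rw [← bxor_assoc, PySem.Int.bxor_comm a b, bxor_assoc]

theorem bxor_cancel_left (a b : Int) : PySem.Int.bxor a (PySem.Int.bxor a b) = b := by
  rw [← bxor_assoc, PySem.Int.bxor_self, PySem.Int.bxor_comm, PySem.Int.bxor_zero]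

theorem zero_bxor (a : Int) : PySem.Int.bxor 0 a = a := by
  rw [PySem.Int.bxor_comm, PySem.Int.bxor_zero]

theorem bxor_neg_one (a : Int) : PySem.Int.bxor a (-1) = -a - 1 := by
  rw [benc_surj a]
  have h1 : (-1 : Int) = benc true 0 := by simp [benc]
  rw [h1, bxor_benc]
  cases s : decide (a < 0) <;> simp [benc]

theorem nat_two_mul_xor_one (k : Nat) : 2 * k ^^^ 1 = 2 * k + 1 := by
  apply Nat.eq_of_testBit_eq
  intro i
  cases i with
  | zero =>
      simp [Nat.testBit_zero]
  | succ j =>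
      have h1 : 2 * k / 2 = k := by omega
      have h2 : (2 * k + 1) / 2 = k := by omega
      rw [Nat.testBit_xor]
      simp [Nat.testBit_succ, h1, h2]

theorem bxor_even_one (a : Int) (h : 0 ≤ a) : PySem.Int.bxor (2 * a) 1 = 2 * a + 1 := by
  have h1 : (2 * a : Int) = ((2 * a.toNat : Nat) : Int) := by omega
  have h2 : (1 : Int) = ((1 : Nat) : Int) := by norm_num
  rw [h1, h2, PySem.Int.bxor_natCast, nat_two_mul_xor_one]
  omega

theorem bxor_even_succ (a : Int) (h : 0 ≤ a) : PySem.Int.bxor (2 * a) (2 * a + 1) = 1 := by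
  rw [← bxor_even_one a h, ← bxor_assoc, PySem.Int.bxor_self, zero_bxor]

theorem pyG_pos (m : Int) (h : 0 < m) :
    pyG m = (if (m - 1) % 4 = 0 then m - 1 else if (m - 1) % 4 = 1 then 1
             else if (m - 1) % 4 = 2 then m else 0) := by
  simp only [pyG, if_pos h, PySem.Int.mod_eq_emod_of_pos (show (0:Int) < 4 by norm_num)]
  split_ifs <;> omega

theorem pyG_step (m : Int) (h : 0 ≤ m) : pyG (m + 1) = PySem.Int.bxor (pyG m) m := by
  rcases eq_or_lt_of_le h with h0 | h0
  · subst h0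
    simp [pyG]
  · rw [pyG_pos m h0, pyG_pos (m + 1) (by omega)]
    have hr : (m - 1) % 4 = 0 ∨ (m - 1) % 4 = 1 ∨ (m - 1) % 4 = 2 ∨ (m - 1) % 4 = 3 := by omega
    rcases hr with hr | hr | hr | hr
    · rw [show (m + 1 - 1) % 4 = 1 from by omega]
      simp only [hr]
      norm_num
      obtain ⟨a, ha⟩ : ∃ a : Int, m = 2 * a + 1 := ⟨(m - 1) / 2, by omega⟩
      rw [show m - 1 = 2 * a from by omega, ha]
      exact (bxor_even_succ a (by omega)).symm
    · rw [show (m + 1 - 1) % 4 = 2 from by omega]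
      simp only [hr]
      norm_num
      obtain ⟨a, ha⟩ : ∃ a : Int, m = 2 * a := ⟨m / 2, by omega⟩
      rw [ha, PySem.Int.bxor_comm, bxor_even_one a (by omega)]
    · rw [show (m + 1 - 1) % 4 = 3 from by omega]
      simp only [hr]
      norm_num
    · rw [show (m + 1 - 1) % 4 = 0 from by omega]
      simp only [hr]
      norm_num
      exact (zero_bxor m).symm

theorem band_one_parity (m : Int) : PySem.Int.band m 1 = m % 2 := by
  rw [PySem.Int.band_one]
  exact PySem.Int.mod_eq_emod_of_pos (by omega)

theorem pyF_step (n : Int) : pyF (n + 1) = PySem.Int.bxor (pyF n) n := by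
  by_cases hn : 0 ≤ n
  · simp only [pyF, if_pos hn, if_pos (by omega : (0:Int) ≤ n + 1)]
    simp only [PySem.Int.bxor_zero]
    exact pyG_step n hn
  · by_cases h1 : n = -1
    · subst h1
      norm_num
      decide
    · have hm2 : (0:Int) < -n - 1 := by omega
      simp only [pyF, if_neg hn, if_neg (by omega : ¬ (0:Int) ≤ n + 1)]
      simp only [band_one_parity]
      have hstep : pyG (-n) = PySem.Int.bxor (pyG (-n - 1)) (-n - 1) := by
        have := pyG_step (-n - 1) (by omega)
        rw [show -n - 1 + 1 = -n by ring] at this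
        exact this
      have hxn : PySem.Int.bxor (-((-n) % 2)) n = PySem.Int.bxor (-((-n - 1) % 2)) (-n - 1) := by
        rcases (by omega : (-n) % 2 = 0 ∨ (-n) % 2 = 1) with hp | hp
        · rw [hp, show (-n - 1) % 2 = 1 from by omega]
          rw [show (-(0:Int)) = 0 by norm_num, zero_bxor]
          rw [show (-(1:Int)) = -1 by norm_num, PySem.Int.bxor_comm (-1 : Int), bxor_neg_one]
          omega
        · rw [hp, show (-n - 1) % 2 = 0 from by omega, show (-(0:Int)) = 0 by norm_num]
          rw [zero_bxor, PySem.Int.bxor_comm, bxor_neg_one]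
      rw [show -(n + 1) = -n - 1 by ring]
      rw [bxor_assoc, hxn, hstep]
      rw [bxor_assoc, bxor_left_comm (-n - 1 : Int), PySem.Int.bxor_self, PySem.Int.bxor_zero]

-- XOR of the row [a, a + len)
def rowXor (a len : Int) : Int := PySem.Int.bxor (pyF (a + len)) (pyF a)

theorem innerA_eq (l : List Int) : ∀ (output start : Int),
    innerA l (output, start) =
      (PySem.Int.bxor output (rowXor start l.length), start + l.length) := by
  induction l with
  | nil =>
      intro output start
      simp [innerA, rowXor, PySem.Int.bxor_self, PySem.Int.bxor_zero]
  | cons x rest ih =>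
      intro output start
      simp only [innerA, ih, List.length_cons, rowXor]
      rw [Prod.mk.injEq]
      push_cast
      refine ⟨?_, ?_⟩
      · have hs : pyF (start + 1) = PySem.Int.bxor (pyF start) start := pyF_step start
        rw [show start + 1 + (rest.length : Int) = start + ((rest.length : Int) + 1) by ring]
        rw [hs]
        simp [bxor_left_comm, PySem.Int.bxor_comm, bxor_cancel_left]
      · ring

-- XOR of the remaining rows: current row starts at a with len L, successive rows shift by alt
def rows (a L alt : Int) : Int :=
  if h : 0 < L then PySem.Int.bxor (rowXor a L) (rows (a + alt) (L - 1) alt) else 0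
termination_by L.toNat
decreasing_by omega

theorem loopA_eq_aux : ∀ (k : Nat) (output start length alt : Int), length.toNat = k →
    loopA output start length alt = PySem.Int.bxor output (rows start length alt) := by
  intro k
  induction k with
  | zero =>
      intro output start length alt hk
      have h : ¬ (0:Int) < length := by omega
      rw [loopA, dif_neg h, rows, dif_neg h, PySem.Int.bxor_zero]
  | succ j ih =>
      intro output start length alt hk
      have h : (0:Int) < length := by omega
      rw [loopA, dif_pos h]
      simp only []
      rw [ih _ _ _ _ (by omega)]
      have hst : innerA (PySem.List.pyRange 1 (length + 1) 1) (output, start) =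
          (PySem.Int.bxor output (rowXor start length), start + length) := by
        have hlen : ((PySem.List.pyRange 1 (length + 1) 1).length : Int) = length := by
          rw [PySem.List.length_pyRange_one]; omega
        have h2 := innerA_eq (PySem.List.pyRange 1 (length + 1) 1) output start
        rw [hlen] at h2
        exact h2
      rw [hst]
      simp only []
      rw [show start + length + (alt - length) = start + alt by ring]
      conv_rhs => rw [rows]
      rw [dif_pos h, ← bxor_assoc]

theorem loopA_eq (output start length alt : Int) :
    loopA output start length alt = PySem.Int.bxor output (rows start length alt) :=
  loopA_eq_aux length.toNat output start length alt rfl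

theorem alt_eq_rows_aux (start alt : Int) : ∀ (k : Nat) (L r acc : Int), L = (k : Int) → r + L = alt →
    (PySem.List.pyRange r alt 1).foldl
      (fun out r => PySem.Int.bxor out (PySem.Int.bxor (pyF (start + r * alt + alt - r)) (pyF (start + r * alt)))) acc
      = PySem.Int.bxor acc (rows (start + r * alt) L alt) := by
  intro k
  induction k with
  | zero =>
      intro L r acc hL hr
      rw [PySem.List.pyRange_one_eq_nil (by omega)]
      rw [rows, dif_neg (by omega)]
      simp [PySem.Int.bxor_zero]
  | succ j ih =>
      intro L r acc hL hr
      rw [PySem.List.pyRange_one_cons (by omega : r < alt)]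
      simp only [List.foldl_cons]
      rw [ih (L - 1) (r + 1) _ (by omega) (by omega)]
      have htr : PySem.Int.bxor (pyF (start + r * alt + alt - r)) (pyF (start + r * alt)) =
          rowXor (start + r * alt) L := by
        simp only [rowXor]
        rw [show start + r * alt + L = start + r * alt + alt - r from by omega]
      conv_rhs => rw [rows]
      rw [dif_pos (by omega : (0:Int) < L), htr,
          show start + (r + 1) * alt = start + r * alt + alt by ring, ← bxor_assoc]

theorem answer_alt_eq_rows (start length : Int) :
    answer_alt start length = rows start length length := by
  by_cases h : 0 ≤ length
  · simp only [answer_alt]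
    rw [alt_eq_rows_aux start length length.toNat length 0 0 (by omega) (by omega)]
    rw [zero_bxor, show start + 0 * length = start by ring]
  · simp only [answer_alt]
    rw [PySem.List.pyRange_one_eq_nil (by omega)]
    rw [rows, dif_neg (by omega)]
    rfl

-- ===== VERDICT (by name: the statement is the Claim_ definition above) =====
theorem answer_spec : Claim_equal_answer := by
  intro start length _
  unfold Spec_answer answer
  rw [loopA_eq, zero_bxor, answer_alt_eq_rows]
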